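-- pv_equiv track=rewrite | github.com/OhmXLLI/CrashHack | ctsv2.py | calcular_maior_ganho_consecutivo
-- ===== SOURCE A (Python) =====
-- def calcular_maior_ganho_consecutivo(percentuais, janela):
--     ganhos_consecutivos = 0
--     maior_ganho = 0
--     for i in range(-janela, 0):
--         if i < -len(percentuais):
--             break
--         if percentuais[i] > percentuais[i - 1]:  # Indica um ganho
--             ganhos_consecutivos += 1
--         else:
--             maior_ganho = max(maior_ganho, ganhos_consecutivos)
--             ganhos_consecutivos = 0
--     maior_ganho = max(maior_ganho, ganhos_consecutivos)
--     return maior_ganho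
-- ===== SOURCE B (Python) =====
-- def calcular_maior_ganho_consecutivo(percentuais, janela):
--     n = len(percentuais)
--     if janela > n:
--         return 0
--     start = min(max(n - janela, 1), n)
--     # positions where the streak breaks, with sentinels at both ends;
--     # the answer is the largest gap between consecutive break positions
--     breaks = [start - 1] \
--         + [i for i in range(start, n) if percentuais[i] <= percentuais[i - 1]] \
--         + [n]
--     return max(b - a - 1 for a, b in zip(breaks, breaks[1:]))
-- ===== Notes on version B (the rewrite author's own statement) =====
-- stated objective: alternative
-- what changed: Instead of A's single pass with a running streak counter and best-so-far maximum, B lists the break positions in the window (indices where the value does not rise, with sentinels at both ends) and returns the largest gap between consecutive break positions minus one.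
-- outside the precondition, e.g. on calcular_maior_ganho_consecutivo([1, 2, 3], 3): A raises IndexError, B returns 2
import Mathlib
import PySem

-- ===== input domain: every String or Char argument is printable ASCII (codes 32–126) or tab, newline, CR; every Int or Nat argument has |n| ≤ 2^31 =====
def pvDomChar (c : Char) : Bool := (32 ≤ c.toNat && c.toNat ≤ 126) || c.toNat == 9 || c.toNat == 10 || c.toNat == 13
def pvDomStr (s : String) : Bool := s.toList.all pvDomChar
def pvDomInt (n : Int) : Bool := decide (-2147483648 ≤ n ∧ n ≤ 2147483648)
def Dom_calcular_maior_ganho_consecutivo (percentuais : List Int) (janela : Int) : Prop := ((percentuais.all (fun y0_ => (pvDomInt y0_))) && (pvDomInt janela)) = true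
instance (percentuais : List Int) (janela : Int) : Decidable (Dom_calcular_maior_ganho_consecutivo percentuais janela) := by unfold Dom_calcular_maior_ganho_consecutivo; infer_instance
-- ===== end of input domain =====

-- B replaces A's running streak-counter loop (with break) by a staged computation: list the
-- break positions inside the window (with sentinels), then return the largest gap between
-- consecutive break positions minus 1; same cost, a genuinely different decomposition.

-- ===== PORT A =====
-- the for-loop with break; `.getD 0` stands for IndexError, which Pre_ excludes
-- 'for i in range(-janela, 0)': k counts the remaining iterations, i is the current index
def pvALoop (percentuais : List Int) : Nat → Int → Int → Int → Int
  | 0, _, gc, mg => max mg gc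
  | k + 1, i, gc, mg =>
    if i < -(percentuais.length : Int) then max mg gc
    else if (PySem.List.pyGet? percentuais i).getD 0 > (PySem.List.pyGet? percentuais (i - 1)).getD 0 then
      pvALoop percentuais k (i + 1) (gc + 1) mg
    else
      pvALoop percentuais k (i + 1) 0 (max mg gc)

def calcular_maior_ganho_consecutivo (percentuais : List Int) (janela : Int) : Int :=
  pvALoop percentuais (0 - -janela).toNat (-janela) 0 0

-- ===== PORT B =====
-- breaks = [start-1] + [i in range(start,n) with p[i] <= p[i-1]] + [n];
-- answer = max(b - a - 1 for a, b in zip(breaks, breaks[1:])).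
-- breaks has >= 2 elements, so Python's max never sees an empty sequence; `.getD 0` is dead.
def calcular_maior_ganho_consecutivo_alt (percentuais : List Int) (janela : Int) : Int :=
  let n : Int := percentuais.length
  if janela > n then 0
  else
    let start : Int := min (max (n - janela) 1) n
    let breaks : List Int :=
      (start - 1) :: ((PySem.List.pyRange start n 1).filter
        (fun i => (PySem.List.pyGet? percentuais i).getD 0 ≤ (PySem.List.pyGet? percentuais (i - 1)).getD 0)) ++ [n]
    (PySem.List.max? ((breaks.zip (breaks.drop 1)).map (fun q => q.2 - q.1 - 1)) (fun x => x)).getD 0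

-- ===== PRECONDITION & SPEC =====
-- Pre_ excludes exactly the inputs where A raises IndexError: janela == len(percentuais) >= 1
-- (there A reads percentuais[-len-1]); it excludes no input on which A returns.
def Pre_calcular_maior_ganho_consecutivo (percentuais : List Int) (janela : Int) : Prop :=
  ¬ (janela = (percentuais.length : Int) ∧ 1 ≤ janela)
instance (percentuais : List Int) (janela : Int) : Decidable (Pre_calcular_maior_ganho_consecutivo percentuais janela) := by unfold Pre_calcular_maior_ganho_consecutivo; infer_instance

def pvWitness_calcular_maior_ganho_consecutivo : List Int × Int := ([1, 3, 2, 4, 5], 3)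

def Spec_calcular_maior_ganho_consecutivo (percentuais : List Int) (janela : Int) (out : Int) : Prop := out = calcular_maior_ganho_consecutivo_alt percentuais janela
instance (percentuais : List Int) (janela : Int) (out : Int) : Decidable (Spec_calcular_maior_ganho_consecutivo percentuais janela out) := by unfold Spec_calcular_maior_ganho_consecutivo; infer_instance

-- ===== CLAIM =====
def Claim_equal_calcular_maior_ganho_consecutivo : Prop := ∀ (percentuais : List Int) (janela : Int), Dom_calcular_maior_ganho_consecutivo percentuais janela → Pre_calcular_maior_ganho_consecutivo percentuais janela → Spec_calcular_maior_ganho_consecutivo percentuais janela (calcular_maior_ganho_consecutivo percentuais janela)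

-- ===== LEMMAS AND PROOFS =====

-- gaps between consecutive break positions (previous break carried as accumulator)
def pvGaps : Int → List Int → List Int
  | _, [] => []
  | a, b :: t => (b - a - 1) :: pvGaps b t

theorem pvZip_gaps (a : Int) (bs : List Int) :
    (((a :: bs).zip bs).map (fun q => q.2 - q.1 - 1)) = pvGaps a bs := by
  induction bs generalizing a with
  | nil => rfl
  | cons b t ih => simp only [List.zip_cons_cons, List.map_cons, ih, pvGaps]

-- abstract A-side fold over the boolean gain sequence
def pvAf : List Bool → Int → Int → Int
  | [], gc, mg => max mg gc
  | true :: t, gc, mg => pvAf t (gc + 1) mg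
  | false :: t, gc, mg => pvAf t 0 (max mg gc)

-- A's loop, on indices strictly inside the negative range, is pvAf on the gain sequence
theorem pvALoop_eq_pvAf (p : List Int) : ∀ (k : Nat) (i : Int),
    (∀ j : Int, i ≤ j → j < i + k → -(p.length : Int) < j) → ∀ gc mg : Int,
    pvALoop p k i gc mg =
      pvAf ((PySem.List.pyRange i (i + k) 1).map
        (fun i => decide ((PySem.List.pyGet? p i).getD 0 > (PySem.List.pyGet? p (i - 1)).getD 0))) gc mg := by
  intro k
  induction k with
  | zero =>
    intro i _ gc mg
    rw [PySem.List.pyRange_one_eq_nil (by omega)]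
    simp [pvALoop, pvAf]
  | succ k ih =>
    intro i h gc mg
    rw [PySem.List.pyRange_one_cons (by omega)]
    have hi : ¬ i < -(p.length : Int) := by have := h i le_rfl (by omega); omega
    have hrest : ∀ j : Int, i + 1 ≤ j → j < (i + 1) + k → -(p.length : Int) < j := by
      intro j h1 h2; exact h j (by omega) (by push_cast; omega)
    by_cases hc : (PySem.List.pyGet? p i).getD 0 > (PySem.List.pyGet? p (i - 1)).getD 0
    · simp only [pvALoop, if_neg hi, if_pos hc, List.map_cons, pvAf, decide_eq_true hc]
      rw [show i + ((k : Nat) + 1 : Nat) = (i + 1) + k by push_cast; omega]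
      exact ih (i + 1) hrest (gc + 1) mg
    · simp only [pvALoop, if_neg hi, if_neg hc, List.map_cons, pvAf, decide_eq_false hc]
      rw [show i + ((k : Nat) + 1 : Nat) = (i + 1) + k by push_cast; omega]
      exact ih (i + 1) hrest 0 (max mg gc)

-- THE KEY LEMMA: folding max over the break gaps equals pvAf over the gain sequence
theorem pvGaps_eq_pvAf (p : List Int) : ∀ (k : Nat) (i a mg : Int), a < i →
    (pvGaps a (((PySem.List.pyRange i (i + k) 1).filter
        (fun j => (PySem.List.pyGet? p j).getD 0 ≤ (PySem.List.pyGet? p (j - 1)).getD 0)) ++ [i + k])).foldl max mg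
      = pvAf ((PySem.List.pyRange i (i + k) 1).map
          (fun j => decide ((PySem.List.pyGet? p j).getD 0 > (PySem.List.pyGet? p (j - 1)).getD 0))) (i - a - 1) mg := by
  intro k
  induction k with
  | zero =>
    intro i a mg ha
    rw [PySem.List.pyRange_one_eq_nil (by omega)]
    simp [pvGaps, pvAf]
  | succ k ih =>
    intro i a mg ha
    rw [PySem.List.pyRange_one_cons (by omega)]
    rw [show i + ((k : Nat) + 1 : Nat) = (i + 1) + k by push_cast; omega]
    by_cases hc : (PySem.List.pyGet? p i).getD 0 > (PySem.List.pyGet? p (i - 1)).getD 0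
    · have hf : ¬ ((PySem.List.pyGet? p i).getD 0 ≤ (PySem.List.pyGet? p (i - 1)).getD 0) := by omega
      simp only [List.filter_cons, decide_eq_false hf, List.map_cons, decide_eq_true hc,
        Bool.false_eq_true, if_false, pvAf]
      rw [show i - a - 1 + 1 = (i + 1) - a - 1 by omega] at *
      exact (by rw [ih (i + 1) a mg (by omega)])
    · have hf : (PySem.List.pyGet? p i).getD 0 ≤ (PySem.List.pyGet? p (i - 1)).getD 0 := by omega
      simp only [List.filter_cons, decide_eq_true hf, List.map_cons, decide_eq_false hc, if_true,
        pvAf, List.cons_append, pvGaps, List.foldl_cons]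
      rw [ih (i + 1) i (max mg (i - a - 1)) (by omega)]
      norm_num

-- the first gap is nonnegative, so Python's max (no initial value) equals foldl max 0
theorem pvMaxD_eq_foldl (x : Int) (t : List Int) (hx : 0 ≤ x) :
    (PySem.List.max? (x :: t) (fun y => y)).getD 0 = (x :: t).foldl max 0 := by
  rw [PySem.List.max?_id_cons]
  simp [List.foldl_cons, max_eq_right hx]

-- negative index shift: xs[i] = xs[i + len] for -len ≤ i < 0
theorem pvGet_shift (p : List Int) (i : Int) (h1 : -(p.length : Int) ≤ i) (h2 : i < 0) :
    PySem.List.pyGet? p i = PySem.List.pyGet? p (i + (p.length : Int)) := by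
  unfold PySem.List.pyGet? PySem.List.pyIdx?
  have h0 : ¬ 0 ≤ i := by omega
  have h3 : 0 ≤ i + (p.length : Int) := by omega
  have h4 : i + (p.length : Int) < (p.length : Int) := by omega
  rw [if_neg h0, if_pos h1, if_pos h3, if_pos h4]
  simp only [Option.bind_some]
  congr 1
  omega

theorem calcular_maior_ganho_consecutivo_spec : Claim_equal_calcular_maior_ganho_consecutivo := by
  intro p j _ hpre
  unfold Pre_calcular_maior_ganho_consecutivo at hpre
  unfold Spec_calcular_maior_ganho_consecutivo
  simp only [calcular_maior_ganho_consecutivo, calcular_maior_ganho_consecutivo_alt]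
  by_cases hjn : j > (p.length : Int)
  · -- A breaks at once; B's guard returns 0
    rw [if_pos hjn]
    obtain ⟨m, hm⟩ : ∃ m : Nat, (0 - -j).toNat = m + 1 := ⟨(0 - -j).toNat - 1, by omega⟩
    rw [hm]
    simp only [pvALoop]
    rw [if_pos (by omega)]
    simp
  · rw [if_neg hjn]
    by_cases hj0 : j ≤ 0
    · -- both window ranges are empty
      rw [show (0 - -j).toNat = 0 by omega]
      by_cases hn0 : (p.length : Int) = 0
      · rw [show min (max ((p.length : Int) - j) 1) (p.length : Int) = 0 by omega]
        rw [PySem.List.pyRange_one_eq_nil (by omega)]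
        simp only [List.filter_nil, pvALoop]
        simp [List.zip_cons_cons, PySem.List.max?_id_cons]
        omega
      · rw [show min (max ((p.length : Int) - j) 1) (p.length : Int) = (p.length : Int) by omega]
        rw [PySem.List.pyRange_one_eq_nil (by omega)]
        simp only [List.filter_nil, pvALoop]
        simp [List.zip_cons_cons, PySem.List.max?_id_cons]
    · -- main case: 0 < j < len
      have hjlt : j < (p.length : Int) := by omega
      rw [show min (max ((p.length : Int) - j) 1) (p.length : Int) = (p.length : Int) - j by omega]
      rw [pvALoop_eq_pvAf p _ (-j) (by intro i h1 h2; omega)]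
      rw [show -j + ((0 - -j).toNat : Int) = 0 by omega]
      -- shift the gain sequence from negative to positive indices
      have hgains :
          (PySem.List.pyRange (-j) 0 1).map
              (fun i => decide ((PySem.List.pyGet? p i).getD 0 > (PySem.List.pyGet? p (i - 1)).getD 0)) =
            (PySem.List.pyRange ((p.length : Int) - j) (p.length : Int) 1).map
              (fun i => decide ((PySem.List.pyGet? p i).getD 0 > (PySem.List.pyGet? p (i - 1)).getD 0)) := by
        rw [PySem.List.pyRange_one, PySem.List.pyRange_one]
        have ht : (0 - -j).toNat = ((p.length : Int) - ((p.length : Int) - j)).toNat := by omega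
        rw [ht, List.map_map, List.map_map]
        refine List.map_congr_left ?_
        intro k hk
        rw [List.mem_range] at hk
        have hk' : (k : Int) < j := by omega
        simp only [Function.comp]
        have e1 : PySem.List.pyGet? p (-j + (k : Int)) =
            PySem.List.pyGet? p ((p.length : Int) - j + (k : Int)) := by
          rw [pvGet_shift p _ (by omega) (by omega)]; ring_nf
        have e2 : PySem.List.pyGet? p (-j + (k : Int) - 1) =
            PySem.List.pyGet? p ((p.length : Int) - j + (k : Int) - 1) := by
          rw [pvGet_shift p _ (by omega) (by omega)]; ring_nf
        rw [e1, e2]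
      rw [hgains]
      -- B's side: zip/max? → pvGaps/foldl → pvAf
      rw [List.cons_append, List.drop_succ_cons, List.drop_zero, pvZip_gaps]
      have hkey := pvGaps_eq_pvAf p ((p.length : Int) - ((p.length : Int) - j)).toNat
        ((p.length : Int) - j) ((p.length : Int) - j - 1) 0 (by omega)
      rw [show ((p.length : Int) - j) + ((((p.length : Int) - ((p.length : Int) - j)).toNat : Int))
            = (p.length : Int) by omega] at hkey
      rw [show ((p.length : Int) - j) - ((p.length : Int) - j - 1) - 1 = 0 by omega] at hkey
      obtain ⟨x, t, hxt⟩ : ∃ x t, (((PySem.List.pyRange ((p.length : Int) - j) (p.length : Int) 1).filter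
          (fun i => (PySem.List.pyGet? p i).getD 0 ≤ (PySem.List.pyGet? p (i - 1)).getD 0)) ++ [(p.length : Int)]) = x :: t := by
        rcases h : ((PySem.List.pyRange ((p.length : Int) - j) (p.length : Int) 1).filter
          (fun i => (PySem.List.pyGet? p i).getD 0 ≤ (PySem.List.pyGet? p (i - 1)).getD 0)) ++ [(p.length : Int)] with _ | ⟨x, t⟩
        · exact absurd h (by simp)
        · exact ⟨x, t, rfl⟩
      have hx0 : (p.length : Int) - j ≤ x := by
        rcases heq : ((PySem.List.pyRange ((p.length : Int) - j) (p.length : Int) 1).filter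
            (fun i => (PySem.List.pyGet? p i).getD 0 ≤ (PySem.List.pyGet? p (i - 1)).getD 0)) with _ | ⟨y, s⟩
        · rw [heq] at hxt; simp at hxt; omega
        · rw [heq] at hxt
          simp only [List.cons_append, List.cons.injEq] at hxt
          have hy : y ∈ PySem.List.pyRange ((p.length : Int) - j) (p.length : Int) 1 :=
            List.mem_of_mem_filter (heq ▸ List.mem_cons_self)
          rw [PySem.List.mem_pyRange_one] at hy
          omega
      rw [hxt, pvGaps]
      rw [pvMaxD_eq_foldl _ _ (by omega)]
      rw [hxt, pvGaps] at hkey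
      exact hkey.symm
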